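-- pv_equiv track=rewrite | github.com/JVitorCarv/cesar-introduction-python-tdd | src/remove_min_max.py | remove_min_max
-- ===== SOURCE A (Python) =====
-- import math
--
-- class NotANumber(Exception):
--     pass
--
-- class NotListError(Exception):
--     pass
--
-- def remove_min_max(input_list):
--     if type(input_list) != list:
--         raise NotListError(f"{input_list} is not a list")
--
--     for i in input_list:
--         if type(i) is str or math.isnan(i):
--             raise NotANumber(f"{i} is not a number")
--
--     if len(input_list) <= 2:
--         return []
--
--     aux = []
--     for i in input_list:
--         aux.append(i)
--
--     aux.remove(min(aux))
--     aux.remove(max(aux))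
--
--     return aux
-- ===== SOURCE B (Python) =====
-- import math
--
-- class NotANumber(Exception):
--     pass
--
-- class NotListError(Exception):
--     pass
--
-- def remove_min_max(input_list):
--     if type(input_list) != list:
--         raise NotListError(f"{input_list} is not a list")
--
--     for i in input_list:
--         if type(i) is str or math.isnan(i):
--             raise NotANumber(f"{i} is not a number")
--
--     if len(input_list) <= 2:
--         return []
--
--     minval = min(input_list)
--     maxval = max(input_list)
--     result = []
--     removed_min = False
--     removed_max = False
--     for x in input_list:
--         if not removed_min and x == minval:
--             removed_min = True
--         elif not removed_max and x == maxval: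
--             removed_max = True
--         else:
--             result.append(x)
--     return result
-- ===== Notes on version B (the rewrite author's own statement) =====
-- stated objective: alternative
-- what changed: Replaces the copy loop plus two list.remove scans with one computation of min and max followed by a single pass that skips the first min occurrence and the first (other) max occurrence using two flags.
import Mathlib
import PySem

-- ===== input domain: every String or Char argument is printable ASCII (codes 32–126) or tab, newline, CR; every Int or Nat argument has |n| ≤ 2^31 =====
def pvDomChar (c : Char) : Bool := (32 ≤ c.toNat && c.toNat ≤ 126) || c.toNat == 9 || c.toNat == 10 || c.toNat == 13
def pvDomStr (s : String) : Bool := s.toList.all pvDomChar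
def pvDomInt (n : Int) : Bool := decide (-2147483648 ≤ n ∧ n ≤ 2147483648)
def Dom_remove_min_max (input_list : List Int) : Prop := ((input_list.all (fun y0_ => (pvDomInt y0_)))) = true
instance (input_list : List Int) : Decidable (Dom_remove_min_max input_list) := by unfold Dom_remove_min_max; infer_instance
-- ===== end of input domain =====

-- B replaces A's copy loop and two list.remove scans by computing min and max once and then
-- building the result in a single flagged pass that skips the first min and first max occurrence
-- (alternative decomposition, same asymptotic cost).


-- ===== PORT A =====
-- (the NotListError / NotANumber checks can never fire on a List Int, so A is total here;
--  the `[]` fallbacks of the matches are unreachable: under length > 2 every Option is some)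
def remove_min_max (input_list : List Int) : List Int :=
  if input_list.length ≤ 2 then []
  else
    let aux := input_list.foldl (fun a i => a ++ [i]) []
    match PySem.List.min? aux (fun x => x) with
    | none => []
    | some mn =>
      match PySem.List.remove? aux mn with
      | none => []
      | some aux1 =>
        match PySem.List.max? aux1 (fun x => x) with
        | none => []
        | some mx =>
          match PySem.List.remove? aux1 mx with
          | none => []
          | some aux2 => aux2

-- ===== PORT B =====
def remove_min_max_alt (input_list : List Int) : List Int :=
  if input_list.length ≤ 2 then []
  else
    match PySem.List.min? input_list (fun x => x), PySem.List.max? input_list (fun x => x) with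
    | some minval, some maxval =>
      (input_list.foldl (fun (s : List Int × Bool × Bool) x =>
        if !s.2.1 && x == minval then (s.1, true, s.2.2)
        else if !s.2.2 && x == maxval then (s.1, s.2.1, true)
        else (s.1 ++ [x], s.2.1, s.2.2)) ([], false, false)).1
    | _, _ => []

-- ===== PRECONDITION & SPEC =====
def Spec_remove_min_max (input_list : List Int) (out : List Int) : Prop := out = remove_min_max_alt input_list
instance (input_list : List Int) (out : List Int) : Decidable (Spec_remove_min_max input_list out) := by unfold Spec_remove_min_max; infer_instance

-- ===== CLAIM (what is proved, stated in full; the proofs are below) =====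
def Claim_equal_remove_min_max : Prop := ∀ (input_list : List Int), Dom_remove_min_max input_list → Spec_remove_min_max input_list (remove_min_max input_list)

-- ===== LEMMAS AND PROOFS =====

-- recursive reading of B's one-pass loop (state = the two flags)
def goRMM (mn mx : Int) : Bool → Bool → List Int → List Int
  | _, _, [] => []
  | rmn, rmx, x :: xs =>
    if !rmn && x == mn then goRMM mn mx true rmx xs
    else if !rmx && x == mx then goRMM mn mx rmn true xs
    else x :: goRMM mn mx rmn rmx xs

theorem copy_foldl (l acc : List Int) : l.foldl (fun a i => a ++ [i]) acc = acc ++ l := by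
  induction l generalizing acc with
  | nil => simp
  | cons x xs ih => simp [List.foldl, ih]

theorem fold_eq_go (mn mx : Int) (l : List Int) (acc : List Int) (rmn rmx : Bool) :
    (l.foldl (fun (s : List Int × Bool × Bool) x =>
        if !s.2.1 && x == mn then (s.1, true, s.2.2)
        else if !s.2.2 && x == mx then (s.1, s.2.1, true)
        else (s.1 ++ [x], s.2.1, s.2.2)) (acc, rmn, rmx)).1
    = acc ++ goRMM mn mx rmn rmx l := by
  induction l generalizing acc rmn rmx with
  | nil => simp [goRMM]
  | cons x xs ih =>
    simp only [List.foldl, goRMM]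
    by_cases h1 : (!rmn && x == mn) = true
    · rw [if_pos h1, if_pos h1]; exact ih acc true rmx
    · rw [if_neg h1, if_neg h1]
      by_cases h2 : (!rmx && x == mx) = true
      · rw [if_pos h2, if_pos h2]; exact ih acc rmn true
      · rw [if_neg h2, if_neg h2, ih (acc ++ [x]) rmn rmx, List.append_assoc]
        rfl

theorem go_tt (mn mx : Int) (l : List Int) : goRMM mn mx true true l = l := by
  induction l with
  | nil => rfl
  | cons x xs ih => simp [goRMM, ih]

theorem go_tf (mn mx : Int) (l : List Int) (h : mx ∈ l) :
    goRMM mn mx true false l = l.erase mx := by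
  induction l with
  | nil => cases h
  | cons x xs ih =>
    by_cases hx : x = mx
    · subst hx; simp [goRMM, go_tt]
    · have hmem : mx ∈ xs := by cases h with
        | head => exact absurd rfl hx
        | tail _ h' => exact h'
      rw [List.erase_cons_tail (by simp [hx])]
      simp [goRMM, hx, ih hmem]

theorem go_ft (mn mx : Int) (l : List Int) (h : mn ∈ l) :
    goRMM mn mx false true l = l.erase mn := by
  induction l with
  | nil => cases h
  | cons x xs ih =>
    by_cases hx : x = mn
    · subst hx; simp [goRMM, go_tt]
    · have hmem : mn ∈ xs := by cases h with
        | head => exact absurd rfl hx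
        | tail _ h' => exact h'
      rw [List.erase_cons_tail (by simp [hx])]
      simp [goRMM, hx, ih hmem]

theorem go_ff (mn mx : Int) (l : List Int) (h1 : mn ∈ l) (h2 : mx ∈ l.erase mn) :
    goRMM mn mx false false l = (l.erase mn).erase mx := by
  induction l with
  | nil => cases h1
  | cons x xs ih =>
    by_cases hx : x = mn
    · subst hx
      rw [List.erase_cons_head] at h2 ⊢
      simp only [goRMM]
      rw [if_pos (by simp)]
      exact go_tf _ _ xs h2
    · have hmn : mn ∈ xs := by cases h1 with
        | head => exact absurd rfl hx
        | tail _ h' => exact h'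
      have herase : (x :: xs).erase mn = x :: xs.erase mn :=
        List.erase_cons_tail (by simp [hx])
      by_cases hmx : x = mx
      · subst hmx
        rw [herase, List.erase_cons_head]
        simp only [goRMM]
        rw [if_neg (by simp [hx]), if_pos (by simp)]
        exact go_ft _ _ xs hmn
      · have h2' : mx ∈ xs.erase mn := by
          rw [herase] at h2
          cases h2 with
          | head => exact absurd rfl hmx
          | tail _ h' => exact h'
        rw [herase, List.erase_cons_tail (by simp [hmx])]
        simp [goRMM, hx, hmx, ih hmn h2']

-- ===== VERDICT (by name: the statement is the Claim_ definition above) =====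
theorem remove_min_max_spec : Claim_equal_remove_min_max := by
  intro l _
  unfold Spec_remove_min_max remove_min_max remove_min_max_alt
  by_cases hlen : l.length ≤ 2
  · simp [hlen]
  · simp only [hlen, if_false]
    have hne : l ≠ [] := by
      intro h; subst h; exact hlen (by simp)
    -- min and max of l exist
    obtain ⟨mn, hmn⟩ : ∃ m, PySem.List.min? l (fun x => x) = some m := by
      cases hmin : PySem.List.min? l (fun x => x) with
      | none => exact absurd ((PySem.List.min?_eq_none_iff l (fun x => x)).mp hmin) hne
      | some m => exact ⟨m, rfl⟩
    obtain ⟨mx, hmx⟩ : ∃ m, PySem.List.max? l (fun x => x) = some m := by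
      cases hmax : PySem.List.max? l (fun x => x) with
      | none => exact absurd ((PySem.List.max?_eq_none_iff l (fun x => x)).mp hmax) hne
      | some m => exact ⟨m, rfl⟩
    have hmn_mem : mn ∈ l := PySem.List.min?_mem hmn
    have hmx_mem : mx ∈ l := PySem.List.max?_mem hmx
    have hmn_min : ∀ y ∈ l, mn ≤ y := fun y hy => PySem.List.min?_isMin hmn y hy
    have hmx_max : ∀ y ∈ l, y ≤ mx := fun y hy => PySem.List.max?_isMax hmx y hy
    -- the copy loop returns l itself
    rw [copy_foldl l [], List.nil_append, hmn]
    simp only [PySem.List.remove?_eq_some_erase l mn hmn_mem]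
    -- mx is still in l.erase mn
    have hmx_in_erase : mx ∈ l.erase mn := by
      by_cases heq : mn = mx
      · -- all elements equal mn; the erase still has ≥ 2 of them
        subst heq
        have hlen' : 0 < (l.erase mn).length := by
          rw [List.length_erase_of_mem hmn_mem]; omega
        obtain ⟨y, hy⟩ := List.exists_mem_of_length_pos hlen'
        have hyl : y ∈ l := List.mem_of_mem_erase hy
        have hymn : y = mn := le_antisymm (hmx_max y hyl) (hmn_min y hyl)
        rwa [hymn] at hy
      · exact (List.mem_erase_of_ne (Ne.symm heq)).mpr hmx_mem
    -- the max of l.erase mn is mx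
    obtain ⟨v, hv⟩ : ∃ m, PySem.List.max? (l.erase mn) (fun x => x) = some m := by
      cases hmax : PySem.List.max? (l.erase mn) (fun x => x) with
      | none =>
        exact absurd hmx_in_erase (by rw [(PySem.List.max?_eq_none_iff (l.erase mn) (fun x => x)).mp hmax]; simp)
      | some m => exact ⟨m, rfl⟩
    have hv_eq : v = mx := by
      have h1 : v ≤ mx :=
        hmx_max v (List.mem_of_mem_erase (PySem.List.max?_mem hv))
      have h2 : mx ≤ v := PySem.List.max?_isMax hv mx hmx_in_erase
      omega
    rw [hv_eq] at hv
    simp only [hv, PySem.List.remove?_eq_some_erase (l.erase mn) mx hmx_in_erase, hmx]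
    rw [fold_eq_go, List.nil_append, go_ff mn mx l hmn_mem hmx_in_erase]
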